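-- pv_equiv track=rewrite | github.com/MichaelTkach/binary-indexed-tree-visualizer | ftree.py | calculate_levels
-- ===== SOURCE A (Python) =====
-- def calculate_levels(n):
--     """Calculate levels for each node based on RSB"""
--     levels = {}
--     for i in range(1, n + 1):
--         RSB = i & -i
--         level = RSB.bit_length()
--         if level not in levels:
--             levels[level] = []
--         levels[level].append(i)
--     return levels
-- ===== SOURCE B (Python) =====
-- def calculate_levels(n):
--     """Calculate levels for each node based on RSB"""
--     if n < 1:
--         return {}
--     return {k: list(range(2 ** (k - 1), n + 1, 2 ** k))
--             for k in range(1, n.bit_length() + 1)}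
-- ===== Notes on version B (the rewrite author's own statement) =====
-- stated objective: faster
-- what changed: Instead of scanning every integer up to n and classifying it by the bit length of its lowest set bit into a dict, B emits each level's bucket directly as a strided range (start at the level's lowest member, step twice that), one range call per level, so the per-element bit computation and dict membership test disappear.
import Mathlib
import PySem

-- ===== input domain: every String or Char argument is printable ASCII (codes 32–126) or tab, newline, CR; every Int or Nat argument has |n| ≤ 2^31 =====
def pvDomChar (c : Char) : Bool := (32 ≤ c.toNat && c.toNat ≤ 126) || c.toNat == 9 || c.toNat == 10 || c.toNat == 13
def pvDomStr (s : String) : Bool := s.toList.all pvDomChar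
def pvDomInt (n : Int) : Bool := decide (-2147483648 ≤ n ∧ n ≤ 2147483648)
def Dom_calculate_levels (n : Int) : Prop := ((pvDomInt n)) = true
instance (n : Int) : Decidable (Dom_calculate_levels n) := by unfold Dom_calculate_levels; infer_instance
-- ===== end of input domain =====

-- B replaces A's per-element scan (classify each i in 1..n by the bit length of its lowest set bit into a dict)
-- by emitting each level's bucket directly as the stride-2^k arithmetic progression; measured faster by a constant factor.

-- ===== PORT A =====
def calculate_levels (n : Int) : List (Int × List Int) :=
  ((PySem.List.pyRange 1 (n+1) 1).foldl
    (fun levels i =>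
      let RSB := PySem.Int.band i (-i)
      let level : Int := (PySem.Int.bitLength RSB : Int)
      let levels := if levels.contains level then levels else levels.insert level ([] : List Int)
      levels.modify level [] (fun xs => xs ++ [i]))
    PySem.Dict.empty).items

-- ===== PORT B =====
-- dict comprehension over the (distinct) keys k = 1 .. n.bit_length(): the assoc list of pairs in that order
def calculate_levels_alt (n : Int) : List (Int × List Int) :=
  if n < 1 then []
  else (PySem.List.pyRange 1 ((PySem.Int.bitLength n : Int) + 1) 1).map
    (fun k => (k, PySem.List.pyRange ((2:Int) ^ (k-1).toNat) (n+1) ((2:Int) ^ k.toNat)))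

-- ===== PRECONDITION & SPEC =====
def Spec_calculate_levels (n : Int) (out : List (Int × List Int)) : Prop := out = calculate_levels_alt n
instance (n : Int) (out : List (Int × List Int)) : Decidable (Spec_calculate_levels n out) := by unfold Spec_calculate_levels; infer_instance

-- ===== CLAIM =====
def Claim_equal_calculate_levels : Prop := ∀ (n : Int), Dom_calculate_levels n → Spec_calculate_levels n (calculate_levels n)

-- ===== LEMMAS AND PROOFS =====

-- the level A assigns to i: bit length of i & -i
def pyKey (i : Int) : Int := (PySem.Int.bitLength (PySem.Int.band i (-i)) : Int)

lemma nat_and_pred (v r : Nat) :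
    (2^(v+1)*r + 2^v) &&& (2^(v+1)*r + 2^v - 1) = 2^(v+1)*r := by
  have hp : ∀ s : Nat, 0 < 2^s := fun s => Nat.two_pow_pos s
  apply Nat.eq_of_testBit_eq
  intro j
  rw [Nat.testBit_and]
  simp only [Nat.testBit_eq_decide_div_mod_eq]
  rcases lt_trichotomy j v with hj | hj | hj
  · -- j < v : bit of a is 0, bit of 2^(v+1)r is 0
    obtain ⟨p, rfl⟩ : ∃ p, v = j + p + 1 := ⟨v - j - 1, by omega⟩
    have e1 : 2^(j+p+1+1)*r + 2^(j+p+1) = 2^j * (2*(2^(p+1)*r + 2^p)) := by ring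
    have e2 : 2^(j+p+1+1)*r = 2^j * (2*(2^(p+1)*r)) := by ring
    rw [e1, e2, Nat.mul_div_cancel_left _ (hp j), Nat.mul_div_cancel_left _ (hp j)]
    simp [Nat.mul_mod_right]
  · -- j = v
    subst hj
    have e1 : 2^(j+1)*r + 2^j = 2^j * (2*r+1) := by ring
    have e2 : 2^(j+1)*r + 2^j - 1 = 2^j * (2*r) + (2^j - 1) := by
      have := hp j; ring_nf; omega
    have e3 : 2^(j+1)*r = 2^j * (2*r) := by ring
    rw [e2, e1, e3, Nat.mul_div_cancel_left _ (hp j), Nat.mul_add_div (hp j),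
      Nat.div_eq_of_lt (by have := hp j; omega)]
    simp [Nat.mul_mod_right]
  · -- j > v : all three quotients by 2^j are r / 2^(j-v-1)
    obtain ⟨t, rfl⟩ : ∃ t, j = v + 1 + t := ⟨j - v - 1, by omega⟩
    have hsplit : ∀ x : Nat, x / 2^(v+1+t) = (x / 2^(v+1)) / 2^t := by
      intro x; rw [Nat.div_div_eq_div_mul, ← pow_add]
    have h1 : (2^(v+1)*r + 2^v) / 2^(v+1) = r := by
      rw [Nat.mul_add_div (hp (v+1)), Nat.div_eq_of_lt (Nat.pow_lt_pow_right one_lt_two (by omega))]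
      omega
    have h2 : (2^(v+1)*r + 2^v - 1) / 2^(v+1) = r := by
      have e2 : 2^(v+1)*r + 2^v - 1 = 2^(v+1) * r + (2^v - 1) := by have := hp v; omega
      rw [e2, Nat.mul_add_div (hp (v+1)), Nat.div_eq_of_lt
        (lt_of_le_of_lt (Nat.sub_le _ _) (Nat.pow_lt_pow_right one_lt_two (by omega)))]
      omega
    have h3 : (2^(v+1)*r) / 2^(v+1) = r := Nat.mul_div_cancel_left _ (hp (v+1))
    rw [hsplit, hsplit, hsplit, h1, h2, h3, Bool.and_self]

lemma bitLength_eq_of_bounds (a c : Nat) (h1 : 2^(c-1) ≤ a) (h2 : a < 2^c) (hc : 1 ≤ c) :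
    PySem.Int.bitLength (a : Int) = c := by
  set L := PySem.Int.bitLength (a : Int) with hL
  have ha : 0 < a := lt_of_lt_of_le (Nat.two_pow_pos (c-1) |>.trans_le h1 |> fun h => h) (le_refl a) |> fun _ => lt_of_lt_of_le (Nat.two_pow_pos (c-1)) h1
  have hub : a < 2^L := by
    have := PySem.Int.lt_two_pow_bitLength (a : Int)
    simpa using this
  have hlb : 2^(L-1) ≤ a := by
    have := PySem.Int.two_pow_bitLength_le (a : Int) (by exact_mod_cast ha.ne')
    simpa using this
  have hL1 : 1 ≤ L := by
    by_contra h
    have : L = 0 := by omega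
    rw [this] at hub; simp at hub; omega
  -- 2^(c-1) ≤ a < 2^L → c-1 < L ; 2^(L-1) ≤ a < 2^c → L-1 < c
  have c1 : c - 1 < L := by
    by_contra h
    exact absurd (le_trans (Nat.pow_le_pow_right (by omega) (by omega) : 2^L ≤ 2^(c-1)) h1) (by omega)
  have c2 : L - 1 < c := by
    by_contra h
    exact absurd (le_trans (Nat.pow_le_pow_right (by omega) (by omega) : 2^c ≤ 2^(L-1)) hlb) (by omega)
  omega

lemma band_self_neg (a : Nat) (ha : 0 < a) :
    PySem.Int.band (a : Int) (-(a : Int)) = ((a - (a &&& (a-1)) : Nat) : Int) := by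
  have h1 : (0:Int) ≤ (a:Int) := by positivity
  have h2 : ¬ (0:Int) ≤ -(a:Int) := by omega
  simp only [PySem.Int.band, h1, if_pos, h2, if_false]
  norm_num

lemma exists_decomp (a : Nat) (h : 0 < a) : ∃ v r, a = 2^(v+1)*r + 2^v := by
  obtain ⟨k, m, hodd, heq⟩ := Nat.exists_eq_two_pow_mul_odd (by omega : a ≠ 0)
  obtain ⟨r, rfl⟩ := hodd
  exact ⟨k, r, by rw [heq]; ring⟩

lemma key_decomp (v r : Nat) : pyKey ((2^(v+1)*r + 2^v : Nat) : Int) = (v : Int) + 1 := by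
  have hpos : 0 < 2^(v+1)*r + 2^v := by have := Nat.two_pow_pos v; omega
  unfold pyKey
  rw [band_self_neg _ hpos, nat_and_pred]
  have e : (2^(v+1)*r + 2^v - 2^(v+1)*r : Nat) = 2^v := by simp
  rw [e]
  rw [bitLength_eq_of_bounds (2^v) (v+1) (by simp) (Nat.pow_lt_pow_right one_lt_two (by omega)) (by omega)]
  push_cast; ring

lemma key_pos_le (a : Nat) (ha : 0 < a) :
    1 ≤ pyKey (a : Int) ∧ pyKey (a : Int) ≤ (PySem.Int.bitLength (a : Int) : Int) := by
  obtain ⟨v, r, rfl⟩ := exists_decomp a ha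
  rw [key_decomp]
  refine ⟨by omega, ?_⟩
  have hub : 2^(v+1)*r + 2^v < 2^(PySem.Int.bitLength ((2^(v+1)*r + 2^v : Nat) : Int)) := by
    have := PySem.Int.lt_two_pow_bitLength ((2^(v+1)*r + 2^v : Nat) : Int)
    simpa using this
  have hlow : 2^v ≤ 2^(v+1)*r + 2^v := by omega
  have : 2^v < 2^(PySem.Int.bitLength ((2^(v+1)*r + 2^v : Nat) : Int)) := lt_of_le_of_lt hlow hub
  have hv : v < PySem.Int.bitLength ((2^(v+1)*r + 2^v : Nat) : Int) :=
    (Nat.pow_lt_pow_iff_right (by omega)).mp this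
  omega

lemma key_iff (a : Nat) (ha : 0 < a) (k : Int) (hk : 1 ≤ k) :
    pyKey (a : Int) = k ↔
      ((2:Int)^((k-1).toNat) ≤ (a : Int) ∧ (2:Int)^(k.toNat) ∣ (a : Int) - (2:Int)^((k-1).toNat)) := by
  obtain ⟨κ, hκ1, rfl⟩ : ∃ κ : Nat, 1 ≤ κ ∧ k = (κ : Int) := ⟨k.toNat, by omega, by omega⟩
  have ht1 : ((κ:Int) - 1).toNat = κ - 1 := by omega
  have ht2 : ((κ:Int)).toNat = κ := by omega
  obtain ⟨v, r, rfl⟩ := exists_decomp a ha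
  rw [key_decomp, ht1, ht2]
  constructor
  · rintro h
    have hκv : κ = v + 1 := by omega
    subst hκv
    constructor
    · simp only [Nat.add_sub_cancel]
      push_cast
      have hr : (0:Int) ≤ (r:Int) := Int.natCast_nonneg r
      nlinarith [pow_pos (by norm_num : (0:Int) < 2) (v+1)]
    · refine ⟨(r : Int), ?_⟩
      push_cast
      ring
  · rintro ⟨_, hdvd⟩
    by_contra hne
    have hne' : κ ≠ v + 1 := by omega
    push_cast at hdvd
    rcases lt_or_gt_of_ne hne' with hlt | hgt
    · -- κ ≤ v
      obtain ⟨c, d, rfl, hd, hc⟩ : ∃ c d, v = c + d ∧ 1 ≤ d ∧ κ - 1 = c :=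
        ⟨κ - 1, v - κ + 1, by omega, by omega, rfl⟩
      rw [hc] at hdvd
      set w : Int := 2^(d+1)*(r:Int) + 2^d - 1 with hw
      have hsplit : (2:Int)^(c+d+1)*(r:Int) + 2^(c+d) - 2^c = 2^c * w := by rw [hw]; ring
      rw [hsplit] at hdvd
      have hκc : κ = c + 1 := by omega
      rw [hκc] at hdvd
      have h2 : (2:Int) ∣ w := by
        have hpow : (2:Int)^(c+1) = 2^c * 2 := by ring
        rw [hpow] at hdvd
        exact (mul_dvd_mul_iff_left (by positivity : (2:Int)^c ≠ 0)).mp hdvd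
      obtain ⟨t, htw⟩ := h2
      have hwodd : w + 1 = 2 * (2^d*(r:Int) + 2^(d-1)) := by
        rw [hw]
        obtain ⟨d', rfl⟩ : ∃ d', d = d' + 1 := ⟨d - 1, by omega⟩
        push_cast
        ring_nf
      omega
    · -- κ ≥ v + 2
      have hsub : (2:Int)^(v+1) ∣ (2:Int)^κ := pow_dvd_pow 2 (by omega)
      have hsub2 : (2:Int)^(v+1) ∣ (2:Int)^(κ-1) := pow_dvd_pow 2 (by omega)
      have hA : (2:Int)^(v+1) ∣ (2^(v+1)*(r:Int) + 2^v) := by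
        have h := dvd_add (dvd_trans hsub hdvd) hsub2
        have e : (2^(v+1)*(r:Int) + 2^v - 2^(κ-1)) + 2^(κ-1) = 2^(v+1)*(r:Int) + 2^v := by ring
        rwa [e] at h
      have : (2:Int)^(v+1) ∣ (2:Int)^v := by
        have h1 : (2:Int)^(v+1) ∣ (2:Int)^(v+1)*(r:Int) := ⟨(r:Int), rfl⟩
        exact (dvd_add_right h1).mp hA
      obtain ⟨t, htt⟩ := this
      have : (1:Int) = 2 * t := by
        have hpow : (2:Int)^(v+1) = 2^v * 2 := by ring
        rw [hpow, mul_assoc] at htt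
        exact mul_left_cancel₀ (by positivity : (2:Int)^v ≠ 0) (by simpa using htt)
      omega

lemma pyRange_pos_succ_right (s e t : Int) (ht : 0 < t) :
    PySem.List.pyRange s (e+1) t
      = PySem.List.pyRange s e t ++ (if s ≤ e ∧ t ∣ (e - s) then [e] else []) := by
  rw [PySem.List.pyRange_of_pos s (e+1) ht, PySem.List.pyRange_of_pos s e ht]
  by_cases hse : s ≤ e
  · have hq := Int.emod_add_mul_ediv (e - s) t
    have hr0 : 0 ≤ (e - s) % t := Int.emod_nonneg _ (by omega)
    have hrt : (e - s) % t < t := Int.emod_lt_of_pos _ ht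
    set q := (e - s) / t with hqdef
    set rr := (e - s) % t with hrdef
    have hq0 : 0 ≤ q := Int.ediv_nonneg (by omega) (by omega)
    have hCnew : (if s < e + 1 then ((e + 1 - s + t - 1) / t).toNat else 0) = q.toNat + 1 := by
      rw [if_pos (by omega : s < e + 1)]
      have h1 : e + 1 - s + t - 1 = rr + (q+1)*t := by linear_combination -hq
      rw [h1, Int.add_mul_ediv_right _ _ (by omega : t ≠ 0), Int.ediv_eq_zero_of_lt hr0 hrt]
      omega
    rw [hCnew]
    by_cases hdvd : t ∣ (e - s)
    · have hrr : rr = 0 := by rw [hrdef]; exact Int.emod_eq_zero_of_dvd hdvd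
      have hCold : (if s < e then ((e - s + t - 1) / t).toNat else 0) = q.toNat := by
        by_cases hse' : s < e
        · rw [if_pos hse']
          have hq1 : 1 ≤ q := by
            by_contra hcon
            push_neg at hcon
            nlinarith
          have h1 : e - s + t - 1 = (t - 1) + q*t := by linear_combination -hq + hrr
          rw [h1, Int.add_mul_ediv_right _ _ (by omega : t ≠ 0),
            Int.ediv_eq_zero_of_lt (by omega) (by omega)]
          omega
        · rw [if_neg hse']
          have : q = 0 := by
            have he : e = s := by omega
            simp [hqdef, he]
          omega
      rw [hCold, if_pos ⟨hse, hdvd⟩, List.range_succ, List.map_append]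
      congr 1
      simp only [List.map_cons, List.map_nil]
      congr 1
      have hqt : ((q.toNat : Nat) : Int) = q := by omega
      rw [hqt]
      linarith
    · have hrr1 : 1 ≤ rr := by
        rcases lt_or_eq_of_le hr0 with h | h
        · omega
        · exact absurd (Int.dvd_of_emod_eq_zero h.symm) hdvd
      have hse' : s < e := by
        rcases eq_or_lt_of_le hse with h | h
        · exact absurd (by rw [← h]; simp : t ∣ (e - s)) hdvd
        · exact h
      have hCold : (if s < e then ((e - s + t - 1) / t).toNat else 0) = q.toNat + 1 := by
        rw [if_pos hse']
        have h1 : e - s + t - 1 = (rr - 1) + (q+1)*t := by linear_combination -hq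
        rw [h1, Int.add_mul_ediv_right _ _ (by omega : t ≠ 0),
          Int.ediv_eq_zero_of_lt (by omega) (by omega)]
        omega
      rw [hCold, if_neg (by tauto)]
      simp
  · rw [if_neg (by omega : ¬ s < e + 1), if_neg (by omega : ¬ s < e), if_neg (by tauto)]
    simp

lemma step_eq :
    (fun (levels : PySem.Dict Int (List Int)) (i : Int) =>
      let RSB := PySem.Int.band i (-i)
      let level : Int := (PySem.Int.bitLength RSB : Int)
      let levels := if levels.contains level then levels else levels.insert level ([] : List Int)
      levels.modify level [] (fun xs => xs ++ [i]))
    = (fun d i => d.modify (pyKey i) [] (fun xs => xs ++ [i])) := by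
  funext d i
  simp only [pyKey]
  set k := ((PySem.Int.bitLength (PySem.Int.band i (-i)) : Nat) : Int) with hk
  by_cases h : d.contains k
  · simp [h]
  · simp only [h, Bool.false_eq_true, if_false]
    show (d.insert k []).modify k [] (fun xs => xs ++ [i]) = d.modify k [] (fun xs => xs ++ [i])
    simp only [PySem.Dict.modify, PySem.Dict.getD_insert_self, PySem.Dict.insert_insert_self,
      PySem.Dict.getD_of_not_contains d ([] : List Int) (by simpa using h), List.nil_append]

lemma a_items (n : Int) :
    calculate_levels n
      = (PySem.Set.ofList ((PySem.List.pyRange 1 (n+1) 1).map pyKey)).map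
          (fun k => (k, (PySem.List.pyRange 1 (n+1) 1).filter (fun i => pyKey i == k))) := by
  unfold calculate_levels
  rw [step_eq]
  set l := PySem.List.pyRange 1 (n+1) 1 with hl
  have hnd : (l.foldl (fun d i => d.modify (pyKey i) [] (fun xs => xs ++ [i])) PySem.Dict.empty).keys.Nodup :=
    PySem.Dict.nodup_keys_foldl_modify_key l pyKey [] (fun _ i => fun xs => xs ++ [i]) _ (by simp)
  rw [PySem.Dict.items_eq_map_keys _ hnd ([] : List Int)]
  rw [PySem.Dict.keys_foldl_modify_key l pyKey [] (fun _ i => fun xs => xs ++ [i])]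
  have hkeys : PySem.Set.update (PySem.Dict.empty : PySem.Dict Int (List Int)).keys (l.map pyKey)
      = PySem.Set.ofList (l.map pyKey) := by
    simp [PySem.Set.update_nil_left, PySem.Dict.keys_empty]
  rw [hkeys]
  refine List.map_congr_left (fun k _ => ?_)
  congr 1
  have hfold : l.foldl (fun d i => d.modify (pyKey i) [] (fun xs => xs ++ [i])) PySem.Dict.empty
      = (l.map (fun i => (pyKey i, i))).foldl (fun d p => d.modify p.1 [] (fun xs => xs ++ [p.2])) PySem.Dict.empty := by
    rw [List.foldl_map]
  rw [hfold, PySem.Dict.getD_foldl_modify_append]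
  simp [List.filter_map, Function.comp_def]

lemma bucket_eq (k : Int) (hk : 1 ≤ k) (m : Nat) :
    (PySem.List.pyRange 1 ((m:Int)+1) 1).filter (fun i => pyKey i == k)
      = PySem.List.pyRange ((2:Int)^((k-1).toNat)) ((m:Int)+1) ((2:Int)^(k.toNat)) := by
  induction m with
  | zero =>
    rw [PySem.List.pyRange_one_eq_nil (by omega)]
    rw [PySem.List.pyRange_of_pos _ _ (by positivity : (0:Int) < 2^(k.toNat)),
      if_neg (by have : (1:Int) ≤ 2^((k-1).toNat) := one_le_pow₀ (by norm_num); omega)]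
    simp
  | succ m ih =>
    have hcast : ((m+1 : Nat) : Int) + 1 = ((m:Int) + 1) + 1 := by push_cast; ring
    rw [hcast, PySem.List.pyRange_one_succ_right (by omega), List.filter_append,
      pyRange_pos_succ_right _ _ _ (by positivity : (0:Int) < 2^(k.toNat)), ih]
    congr 1
    have hm1 : ((m:Int)+1) = ((m+1 : Nat) : Int) := by push_cast; ring
    rw [hm1]
    have hiff := key_iff (m+1) (by omega) k hk
    by_cases h : pyKey (((m+1:Nat)) : Int) = k
    · rw [if_pos (hiff.mp h)]
      have h' : pyKey ((m:Int)+1) = k := by rw [hm1]; exact h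
      simp [h']
    · rw [if_neg (fun hc => h (hiff.mpr hc))]
      have h' : ¬ pyKey ((m:Int)+1) = k := by rw [hm1]; exact h
      simp [h']

lemma keys_eq (m : Nat) (hm : 1 ≤ m) :
    PySem.Set.ofList ((PySem.List.pyRange 1 ((m:Int)+1) 1).map pyKey)
      = PySem.List.pyRange 1 ((PySem.Int.bitLength (m:Int) : Int) + 1) 1 := by
  induction m, hm using Nat.le_induction with
  | base => decide
  | succ m hm ih =>
    set L := PySem.Int.bitLength (m : Int) with hLdef
    have hub : m < 2^L := by
      have := PySem.Int.lt_two_pow_bitLength (m : Int)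
      simpa using this
    have hlb : 2^(L-1) ≤ m := by
      have := PySem.Int.two_pow_bitLength_le (m : Int) (by exact_mod_cast (by omega : m ≠ 0))
      simpa using this
    have hL1 : 1 ≤ L := by
      by_contra h
      have hL0 : L = 0 := by omega
      rw [hL0] at hub
      simp at hub
      omega
    have hcast : ((m+1 : Nat) : Int) + 1 = ((m:Int) + 1) + 1 := by push_cast; ring
    rw [hcast, PySem.List.pyRange_one_succ_right (by omega), List.map_append]
    have hm1 : ((m:Int)+1) = ((m+1 : Nat) : Int) := by push_cast; ring
    rw [List.map_singleton, PySem.Set.ofList_append_singleton, ih, hm1]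
    by_cases hpow : m + 1 = 2^L
    · -- a new level appears: m+1 is a power of two
      have hkey : pyKey ((m+1 : Nat) : Int) = (L:Int) + 1 := by
        obtain ⟨L', hL'⟩ : ∃ L', L = L' + 1 := ⟨L - 1, by omega⟩
        have hmp : m + 1 = 2^(L'+1+1)*0 + 2^(L'+1) := by rw [← hL']; omega
        rw [hmp, key_decomp, hL']
      have hbl : PySem.Int.bitLength ((m+1 : Nat) : Int) = L + 1 := by
        apply bitLength_eq_of_bounds (m+1) (L+1) (by simpa using hpow.ge) _ (by omega)
        have : 2^L < 2^(L+1) := Nat.pow_lt_pow_right one_lt_two (by omega)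
        omega
      rw [hkey, hbl, PySem.Set.add_of_not_mem (by
        intro hmem
        have := (PySem.List.mem_pyRange_one.mp hmem).2
        omega)]
      rw [show ((L+1:Nat):Int) + 1 = ((L:Int) + 1) + 1 from by push_cast; ring,
        ← PySem.List.pyRange_one_succ_right (by omega)]
    · -- level set unchanged
      have hbl : PySem.Int.bitLength ((m+1 : Nat) : Int) = L :=
        bitLength_eq_of_bounds (m+1) L (by omega) (by omega) hL1
      have hkb := key_pos_le (m+1) (by omega)
      rw [hbl] at hkb
      rw [hbl, PySem.Set.add_of_mem (PySem.List.mem_pyRange_one.mpr ⟨hkb.1, by omega⟩)]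

-- ===== VERDICT =====
theorem calculate_levels_spec : Claim_equal_calculate_levels := by
  intro n _
  unfold Spec_calculate_levels calculate_levels_alt
  by_cases hn : n < 1
  · rw [if_pos hn, a_items, PySem.List.pyRange_one_eq_nil (by omega)]
    rfl
  · rw [if_neg hn]
    obtain ⟨m, rfl⟩ : ∃ m : Nat, n = (m : Int) := ⟨n.toNat, by omega⟩
    have hm : 1 ≤ m := by exact_mod_cast not_lt.mp hn
    rw [a_items, keys_eq m hm]
    refine List.map_congr_left (fun k hk => ?_)
    have h1k : 1 ≤ k := (PySem.List.mem_pyRange_one.mp hk).1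
    rw [bucket_eq k h1k m]
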